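-- pv_equiv track=rewrite | github.com/CK12/ck12-webhelpers | branches/dev/python-223/flx/f2pdf/drivers/twocolumn.py | protect_dl
-- ===== SOURCE A (Python) =====
-- def protect_dl(text,ancestor=[]):
--     myAn = ancestor[:]
--     bg = '\n '
--     ee = '\n '
--     while ('dl' in myAn):
--         if ('dl' == myAn[-1] ):
--             myAn.pop()
--             bg = r'\begin{description}' + '\n' + bg
--             ee = r'\end{description}' + '\n' + ee
--         else:
--             myAn.pop()
--     return  ee  + text + '\n' + r'\item[]' + bg
-- ===== SOURCE B (Python) =====
-- def protect_dl(text, ancestor=[]):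
--     n = ancestor.count('dl')
--     bg = ('\\begin{description}' + '\n') * n + '\n '
--     ee = ('\\end{description}' + '\n') * n + '\n '
--     return ee + text + '\n' + '\\item[]' + bg
-- ===== Notes on version B (the rewrite author's own statement) =====
-- stated objective: simpler
-- what changed: The destructive while/pop loop with its membership rescan and branch is replaced by a single count of 'dl' and closed-form string repetition.
import Mathlib
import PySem

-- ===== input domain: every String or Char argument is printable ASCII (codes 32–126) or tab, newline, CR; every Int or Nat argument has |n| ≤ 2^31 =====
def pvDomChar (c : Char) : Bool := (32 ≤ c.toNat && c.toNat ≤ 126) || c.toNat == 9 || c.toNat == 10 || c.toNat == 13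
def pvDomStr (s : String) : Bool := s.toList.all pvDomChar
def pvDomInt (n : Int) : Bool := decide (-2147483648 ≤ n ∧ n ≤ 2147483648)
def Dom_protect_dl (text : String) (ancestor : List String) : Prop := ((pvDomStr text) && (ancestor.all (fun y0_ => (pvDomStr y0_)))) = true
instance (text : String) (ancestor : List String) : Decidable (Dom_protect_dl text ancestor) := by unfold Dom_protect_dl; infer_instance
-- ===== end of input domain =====

-- B replaces A's destructive while/pop loop (membership rescan + branch each step)
-- by counting 'dl' once and building both wrappers by closed-form string repetition ("simpler").


-- ===== PORT A =====
-- the while-loop: pops from the end while 'dl' is a member, prepending to bg/ee when the last element is 'dl'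
def protect_dl_loop (myAn : List String) (bg ee : String) : String × String :=
  if h : "dl" ∈ myAn then
    if myAn.getLast (List.ne_nil_of_mem h) = "dl" then
      protect_dl_loop myAn.dropLast ("\\begin{description}" ++ "\n" ++ bg)
        ("\\end{description}" ++ "\n" ++ ee)
    else
      protect_dl_loop myAn.dropLast bg ee
  else (bg, ee)
termination_by myAn.length
decreasing_by
  all_goals
    have hne : myAn ≠ [] := List.ne_nil_of_mem h
    have := List.length_pos_of_ne_nil hne
    simp [List.length_dropLast]
    omega

def protect_dl (text : String) (ancestor : List String) : String :=
  let r := protect_dl_loop ancestor "\n " "\n "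
  r.2 ++ text ++ "\n" ++ "\\item[]" ++ r.1

-- ===== PORT B =====
-- Python string repetition s * n
def pyMulStr (s : String) : Nat → String
  | 0 => ""
  | n + 1 => s ++ pyMulStr s n

def protect_dl_alt (text : String) (ancestor : List String) : String :=
  let n := ancestor.count "dl"
  let bg := pyMulStr ("\\begin{description}" ++ "\n") n ++ "\n "
  let ee := pyMulStr ("\\end{description}" ++ "\n") n ++ "\n "
  ee ++ text ++ "\n" ++ "\\item[]" ++ bg

-- ===== PRECONDITION & SPEC =====
def Spec_protect_dl (text : String) (ancestor : List String) (out : String) : Prop := out = protect_dl_alt text ancestor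
instance (text : String) (ancestor : List String) (out : String) : Decidable (Spec_protect_dl text ancestor out) := by unfold Spec_protect_dl; infer_instance

-- ===== CLAIM (what is proved, stated in full; the proofs are below) =====
def Claim_equal_protect_dl : Prop := ∀ (text : String) (ancestor : List String), Dom_protect_dl text ancestor → Spec_protect_dl text ancestor (protect_dl text ancestor)

-- ===== LEMMAS AND PROOFS =====
theorem pyMulStr_succ_right (s : String) (n : Nat) :
    pyMulStr s (n + 1) = pyMulStr s n ++ s := by
  induction n with
  | zero => simp [pyMulStr]
  | succ k ih =>
      simp only [pyMulStr] at *
      conv_rhs => rw [String.append_assoc, ← ih]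

theorem protect_dl_loop_eq (l : List String) (bg ee : String) :
    protect_dl_loop l bg ee =
      (pyMulStr ("\\begin{description}" ++ "\n") (l.count "dl") ++ bg,
       pyMulStr ("\\end{description}" ++ "\n") (l.count "dl") ++ ee) := by
  induction l using List.reverseRecOn generalizing bg ee with
  | nil =>
      rw [protect_dl_loop]
      simp [pyMulStr]
  | append_singleton l' a ih =>
      rw [protect_dl_loop]
      by_cases hmem : "dl" ∈ l' ++ [a]
      · simp only [dif_pos hmem]
        have hlast : (l' ++ [a]).getLast (List.ne_nil_of_mem hmem) = a :=
          List.getLast_concat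
        have hdrop : (l' ++ [a]).dropLast = l' := List.dropLast_concat
        rw [hlast, hdrop]
        by_cases ha : a = "dl"
        · rw [if_pos ha, ih]
          have hc : (l' ++ [a]).count "dl" = l'.count "dl" + 1 := by
            simp [List.count_append, ha]
          rw [hc, pyMulStr_succ_right, pyMulStr_succ_right]
          simp [String.append_assoc]
        · rw [if_neg ha, ih]
          have hc : (l' ++ [a]).count "dl" = l'.count "dl" := by
            simp [List.count_append, ha]
          rw [hc]
      · simp only [dif_neg hmem]
        have hc : (l' ++ [a]).count "dl" = 0 := by
          exact List.count_eq_zero.mpr (fun h => hmem h)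
        rw [hc]
        simp [pyMulStr]

-- ===== VERDICT (by name: the statement is the Claim_ definition above) =====
theorem protect_dl_spec : Claim_equal_protect_dl := by
  intro text ancestor _
  unfold Spec_protect_dl protect_dl protect_dl_alt
  rw [protect_dl_loop_eq]
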